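-- pv_equiv track=rewrite | github.com/shreyanimbali/Information-Retrieval | retrieve.py | find_successors
-- ===== SOURCE A (Python) =====
-- def find_successors(arr):
--     first_array = arr[0]
--     for x in first_array:
--         successor_found = False
--         for j in range(1, len(arr)):
--             if x + 1 in arr[j]:
--                 x += 1
--                 successor_found = True
--             else:
--                 successor_found = False
--                 break
--         if successor_found is True:
--             return True
--     return False
-- ===== SOURCE B (Python) =====
-- def find_successors(arr):
--     candidates = set(arr[0])
--     if len(arr) < 2:
--         return False
--     for k in range(1, len(arr)):
--         candidates &= {v - k for v in arr[k]}
--         if not candidates: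
--             return False
--     return True
-- ===== Notes on version B (the rewrite author's own statement) =====
-- stated objective: alternative
-- what changed: Replaces A's per-start-element chain walk (a linear `in list` scan of each later list for every candidate) with a single forward pass that maintains the shrinking set-intersection of shifted candidate start values, returning False as soon as it empties.
import Mathlib
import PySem

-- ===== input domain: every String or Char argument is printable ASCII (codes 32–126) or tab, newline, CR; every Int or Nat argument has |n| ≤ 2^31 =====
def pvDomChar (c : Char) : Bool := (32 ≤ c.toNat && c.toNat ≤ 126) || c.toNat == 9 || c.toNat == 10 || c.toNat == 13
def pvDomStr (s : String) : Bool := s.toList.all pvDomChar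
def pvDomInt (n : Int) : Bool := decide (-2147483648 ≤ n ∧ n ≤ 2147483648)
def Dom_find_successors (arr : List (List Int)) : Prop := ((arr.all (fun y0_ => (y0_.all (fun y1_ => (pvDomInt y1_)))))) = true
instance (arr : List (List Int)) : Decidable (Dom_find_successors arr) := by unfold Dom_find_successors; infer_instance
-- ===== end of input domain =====

-- B replaces A's per-start-element chain walk (membership-scanning each later list once
-- per candidate) by one pass that intersects sets of shifted candidate start values.

-- ===== PORT A =====
-- inner loop `for j in range(1, len(arr))` with mutable x and successor_found
def aInner (arr : List (List Int)) : List Int → Int → Bool → Bool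
  | [], _, found => found
  | j :: rest, x, _ =>
    if (PySem.List.pyGetD arr j []).contains (x + 1) then aInner arr rest (x + 1) true
    else false

-- outer loop `for x in first_array` with early `return True`
def aOuter (arr : List (List Int)) : List Int → Bool
  | [] => false
  | x :: xs =>
    if aInner arr (PySem.List.pyRange 1 (arr.length : Int) 1) x false then true
    else aOuter arr xs

def find_successors (arr : List (List Int)) : Bool :=
  match arr with
  | [] => false   -- Python A raises IndexError at `arr[0]`; excluded by Pre_
  | first :: _ => aOuter arr first

-- ===== PORT B =====
-- loop `for k in range(1, len(arr)): candidates &= {v - k for v in arr[k]}; if not candidates: return False`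
def bLoop (arr : List (List Int)) : List Int → PySem.Set Int → Bool
  | [], _ => true
  | k :: rest, cands =>
    let cands' := PySem.Set.inter cands
        (PySem.Set.ofList ((PySem.List.pyGetD arr k []).map (fun v => v - k)))
    if cands' = [] then false else bLoop arr rest cands'

def find_successors_alt (arr : List (List Int)) : Bool :=
  match arr with
  | [] => false   -- Python B raises IndexError at `arr[0]`; excluded by Pre_
  | first :: _ =>
    let candidates := PySem.Set.ofList first
    if (arr.length : Int) < 2 then false
    else bLoop arr (PySem.List.pyRange 1 (arr.length : Int) 1) candidates

-- ===== PRECONDITION & SPEC =====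
-- Pre_ excludes only the empty outer list, on which both Pythons raise IndexError at arr[0].
def Pre_find_successors (arr : List (List Int)) : Prop := arr ≠ []
instance (arr : List (List Int)) : Decidable (Pre_find_successors arr) := by unfold Pre_find_successors; infer_instance
def pvWitness_find_successors : List (List Int) := [[1, 5], [2], [3, 9]]

def Spec_find_successors (arr : List (List Int)) (out : Bool) : Prop := out = find_successors_alt arr
instance (arr : List (List Int)) (out : Bool) : Decidable (Spec_find_successors arr out) := by unfold Spec_find_successors; infer_instance

-- ===== CLAIM (what is proved, stated in full; the proofs are below) =====
def Claim_equal_find_successors : Prop := ∀ (arr : List (List Int)), Dom_find_successors arr → Pre_find_successors arr → Spec_find_successors arr (find_successors arr)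

-- ===== LEMMAS AND PROOFS =====

-- A's inner loop, started with found := True: walks the chain s+a, s+a+1, … through arr[a..b)
lemma aInner_true_iff (arr : List (List Int)) (b : Int) :
    ∀ (m : Nat) (a s : Int), (b - a).toNat = m →
      (aInner arr (PySem.List.pyRange a b 1) (s + a - 1) true = true ↔
        ∀ k : Int, a ≤ k → k < b → (s + k) ∈ PySem.List.pyGetD arr k []) := by
  intro m
  induction m with
  | zero =>
    intro a s hm
    have hba : b ≤ a := by omega
    have : PySem.List.pyRange a b 1 = [] := by
      rw [PySem.List.pyRange_one, hm]; rfl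
    rw [this]
    simp only [aInner]
    constructor
    · intro _ k hk1 hk2; omega
    · intro _; trivial
  | succ m ih =>
    intro a s hm
    have hab : a < b := by omega
    rw [PySem.List.pyRange_one_cons hab]
    simp only [aInner]
    have e1 : s + a - 1 + 1 = s + a := by ring
    rw [e1]
    by_cases h : (s + a) ∈ PySem.List.pyGetD arr a []
    · rw [if_pos (by simpa using h)]
      have e2 : s + a = s + (a + 1) - 1 := by ring
      rw [e2]
      rw [ih (a + 1) s (by omega)]
      constructor
      · intro hall k hk1 hk2
        rcases eq_or_lt_of_le hk1 with rfl | hlt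
        · exact h
        · exact hall k (by omega) hk2
      · intro hall k hk1 hk2; exact hall k (by omega) hk2
    · rw [if_neg (by simpa using h)]
      constructor
      · intro hfalse; cases hfalse
      · intro hall; exact absurd (hall a le_rfl hab) h
    
-- found := False only matters when the range is empty
lemma aInner_false_eq (arr : List (List Int)) (js : List Int) (x : Int) (h : js ≠ []) :
    aInner arr js x false = aInner arr js x true := by
  cases js with
  | nil => exact absurd rfl h
  | cons j rest => rfl

lemma aOuter_iff (arr : List (List Int)) :
    ∀ l : List Int, aOuter arr l = true ↔
      ∃ x ∈ l, aInner arr (PySem.List.pyRange 1 (arr.length : Int) 1) x false = true := by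
  intro l
  induction l with
  | nil => simp [aOuter]
  | cons x xs ih =>
    simp only [aOuter]
    by_cases h : aInner arr (PySem.List.pyRange 1 (arr.length : Int) 1) x false = true
    · rw [if_pos h]; simp [h]
    · rw [if_neg h, ih]
      constructor
      · rintro ⟨y, hy, hay⟩; exact ⟨y, List.mem_cons_of_mem _ hy, hay⟩
      · rintro ⟨y, hy, hay⟩
        rcases List.mem_cons.mp hy with rfl | hy'
        · exact absurd hay h
        · exact ⟨y, hy', hay⟩

-- B's loop keeps exactly the starts s whose chain survives every processed index
lemma bLoop_iff (arr : List (List Int)) :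
    ∀ (ks : List Int) (c : PySem.Set Int), bLoop arr ks c = true ↔
      (ks = [] ∨ ∃ s ∈ c, ∀ k ∈ ks, (s + k) ∈ PySem.List.pyGetD arr k []) := by
  intro ks
  induction ks with
  | nil => intro c; simp [bLoop]
  | cons k rest ih =>
    intro c
    simp only [bLoop]
    set c' := PySem.Set.inter c
        (PySem.Set.ofList ((PySem.List.pyGetD arr k []).map (fun v => v - k))) with hc'
    have hmem : ∀ s : Int, s ∈ c' ↔ s ∈ c ∧ (s + k) ∈ PySem.List.pyGetD arr k [] := by
      intro s
      rw [hc', PySem.Set.mem_inter, PySem.Set.mem_ofList, List.mem_map]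
      constructor
      · rintro ⟨hs, v, hv, rfl⟩; exact ⟨hs, by simpa using hv⟩
      · rintro ⟨hs, hsk⟩; exact ⟨hs, s + k, hsk, by ring⟩
    by_cases hempty : c' = []
    · rw [if_pos hempty]
      constructor
      · intro hfalse; cases hfalse
      · rintro (hnil | ⟨s, hs, hall⟩)
        · cases hnil
        · have : s ∈ c' := (hmem s).mpr ⟨hs, hall k (List.mem_cons_self)⟩
          rw [hempty] at this; cases this
    · rw [if_neg hempty, ih c']
      constructor
      · rintro (rfl | ⟨s, hs, hall⟩)
        · rcases List.exists_mem_of_ne_nil c' hempty with ⟨s, hs⟩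
          rcases (hmem s).mp hs with ⟨hsc, hsk⟩
          refine Or.inr ⟨s, hsc, ?_⟩
          intro j hj
          rcases List.mem_cons.mp hj with rfl | hj'
          · exact hsk
          · cases hj'
        · rcases (hmem s).mp hs with ⟨hsc, hsk⟩
          refine Or.inr ⟨s, hsc, ?_⟩
          intro j hj
          rcases List.mem_cons.mp hj with rfl | hj'
          · exact hsk
          · exact hall j hj'
      · rintro (hnil | ⟨s, hs, hall⟩)
        · cases hnil
        · refine Or.inr ⟨s, (hmem s).mpr ⟨hs, hall k List.mem_cons_self⟩, ?_⟩
          exact fun j hj => hall j (List.mem_cons_of_mem _ hj)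

-- ===== VERDICT (by name: the statement is the Claim_ definition above) =====
theorem find_successors_spec : Claim_equal_find_successors := by
  intro arr _ hpre
  unfold Spec_find_successors
  cases arr with
  | nil => exact absurd rfl hpre
  | cons first tl =>
    rw [Bool.eq_iff_iff]
    simp only [find_successors, find_successors_alt]
    by_cases h2 : ((first :: tl).length : Int) < 2
    · -- one list: A's inner range is empty so A returns False; B's guard returns False
      rw [if_pos h2]
      have hlen : (first :: tl).length = 1 := by simp at h2 ⊢; omega
      have hr : PySem.List.pyRange 1 ((first :: tl).length : Int) 1 = [] := by
        rw [hlen]; decide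
      rw [aOuter_iff]
      simp only [hr]
      constructor
      · rintro ⟨x, _, hx⟩; cases hx
      · intro hfalse; cases hfalse
    · rw [if_neg h2]
      have h2' : 2 ≤ ((first :: tl).length : Int) := by omega
      have hone : (1 : Int) ∈ PySem.List.pyRange 1 ((first :: tl).length : Int) 1 :=
        PySem.List.mem_pyRange_one.mpr ⟨le_rfl, by omega⟩
      have hne : PySem.List.pyRange 1 ((first :: tl).length : Int) 1 ≠ [] :=
        List.ne_nil_of_mem hone
      rw [aOuter_iff, bLoop_iff]
      constructor
      · rintro ⟨x, hx, hax⟩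
        rw [aInner_false_eq _ _ _ hne] at hax
        have e : x = x + 1 - 1 := by ring
        rw [e] at hax
        have hall := (aInner_true_iff (first :: tl) ((first :: tl).length : Int)
          (((first :: tl).length : Int) - 1).toNat 1 x (by omega)).mp hax
        refine Or.inr ⟨x, (PySem.Set.mem_ofList first x).mpr hx, ?_⟩
        intro k hk
        rcases PySem.List.mem_pyRange_one.mp hk with ⟨hk1, hk2⟩
        exact hall k hk1 hk2
      · rintro (hnil | ⟨s, hs, hall⟩)
        · exact absurd hnil hne
        · refine ⟨s, (PySem.Set.mem_ofList first s).mp hs, ?_⟩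
          rw [aInner_false_eq _ _ _ hne]
          have hinner := (aInner_true_iff (first :: tl) ((first :: tl).length : Int)
            (((first :: tl).length : Int) - 1).toNat 1 s (by omega)).mpr
            (fun k hk1 hk2 => hall k (PySem.List.mem_pyRange_one.mpr ⟨hk1, hk2⟩))
          have e : s + 1 - 1 = s := by ring
          rw [e] at hinner
          exact hinner
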